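-- pv_equiv track=rewrite | github.com/AlexandrAlexeevich/module2hard.py | практическое задание по модулю.py | find_password
-- ===== SOURCE A (Python) =====
-- def find_password(n):
--     pairs = [ ]
--     for i in range ( 1 , 21 ):
--         for j in range ( i + 1 , 21 ):
--             if i + j != n:
--                 continue
--             pairs.append ( (i , j) )
--
--     result = ''.join ( [ str ( pair[ 0 ] ) + str ( pair[ 1 ] ) for pair in pairs ] )
--     return result
-- ===== SOURCE B (Python) =====
-- def find_password(n):
--     parts = []
--     for i in range(1, 21):
--         j = n - i
--         if i < j <= 20:
--             parts.append(str(i) + str(j))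
--     return ''.join(parts)
-- ===== Notes on version B (the rewrite author's own statement) =====
-- stated objective: simpler
-- what changed: Replaced the nested scan over all (i,j) pairs by a single loop that computes the complement j = n - i arithmetically and keeps it when i < j <= 20.
import Mathlib
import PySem

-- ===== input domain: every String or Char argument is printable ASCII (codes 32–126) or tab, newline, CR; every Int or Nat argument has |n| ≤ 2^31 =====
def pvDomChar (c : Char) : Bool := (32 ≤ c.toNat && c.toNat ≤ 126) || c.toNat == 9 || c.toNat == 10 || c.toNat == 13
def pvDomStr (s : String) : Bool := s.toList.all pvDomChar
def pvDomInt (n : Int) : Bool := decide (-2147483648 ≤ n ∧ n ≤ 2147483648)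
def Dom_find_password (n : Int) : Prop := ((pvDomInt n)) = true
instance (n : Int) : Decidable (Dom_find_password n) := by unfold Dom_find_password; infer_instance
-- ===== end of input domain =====

-- B replaces A's nested scan over all (i, j) pairs by a single loop computing j = n - i arithmetically (simpler).

-- ===== PORT A =====
def find_password (n : Int) : String :=
  let pairs : List (Int × Int) :=
    (PySem.List.pyRange 1 21 1).foldl (fun acc i =>
      (PySem.List.pyRange (i + 1) 21 1).foldl (fun acc2 j =>
        if i + j ≠ n then acc2 else acc2 ++ [(i, j)]) acc) []
  PySem.Str.join "" (pairs.map (fun p => PySem.Int.toStr p.1 ++ PySem.Int.toStr p.2))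

-- ===== PORT B =====
def find_password_alt (n : Int) : String :=
  let parts : List String :=
    (PySem.List.pyRange 1 21 1).foldl (fun acc i =>
      let j := n - i
      if i < j ∧ j ≤ 20 then acc ++ [PySem.Int.toStr i ++ PySem.Int.toStr j] else acc) []
  PySem.Str.join "" parts

-- ===== PRECONDITION & SPEC =====
def Spec_find_password (n : Int) (out : String) : Prop := out = find_password_alt n
instance (n : Int) (out : String) : Decidable (Spec_find_password n out) := by unfold Spec_find_password; infer_instance

-- ===== CLAIM (what is proved, stated in full; the proofs are below) =====
def Claim_equal_find_password : Prop := ∀ (n : Int), Dom_find_password n → Spec_find_password n (find_password n)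

-- ===== LEMMAS AND PROOFS =====

-- a fold whose step never changes the accumulator returns it unchanged
theorem pv_foldl_id {α β : Type} (g : β → α → β) :
    ∀ (l : List α) (acc : β), (∀ x ∈ l, ∀ b, g b x = b) → l.foldl g acc = acc := by
  intro l
  induction l with
  | nil => intro acc _; rfl
  | cons x xs ih =>
    intro acc h
    simp only [List.foldl_cons]
    rw [h x (List.mem_cons_self) acc]
    exact ih acc (fun y hy b => h y (List.mem_cons_of_mem _ hy) b)

theorem pvA_empty (n : Int) (h : n < 3 ∨ 39 < n) : find_password n = "" := by
  unfold find_password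
  have hp : (PySem.List.pyRange 1 21 1).foldl (fun acc i =>
      (PySem.List.pyRange (i + 1) 21 1).foldl (fun acc2 j =>
        if i + j ≠ n then acc2 else acc2 ++ [(i, j)]) acc) ([] : List (Int × Int)) = [] := by
    apply pv_foldl_id
    intro i hi acc
    rw [PySem.List.mem_pyRange_one] at hi
    apply pv_foldl_id
    intro j hj b
    rw [PySem.List.mem_pyRange_one] at hj
    have : i + j ≠ n := by omega
    simp [this]
  rw [hp]
  decide

theorem pvB_empty (n : Int) (h : n < 3 ∨ 39 < n) : find_password_alt n = "" := by
  unfold find_password_alt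
  have hp : (PySem.List.pyRange 1 21 1).foldl (fun acc i =>
      let j := n - i
      if i < j ∧ j ≤ 20 then acc ++ [PySem.Int.toStr i ++ PySem.Int.toStr j] else acc)
      ([] : List String) = [] := by
    apply pv_foldl_id
    intro i hi acc
    rw [PySem.List.mem_pyRange_one] at hi
    have : ¬ (i < n - i ∧ n - i ≤ 20) := by omega
    simp only []
    rw [if_neg this]
  rw [hp]
  decide

-- ===== VERDICT (by name: the statement is the Claim_ definition above) =====
set_option maxRecDepth 4000 in
theorem find_password_spec : Claim_equal_find_password := by
  intro n _
  unfold Spec_find_password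
  by_cases h : 3 ≤ n ∧ n ≤ 39
  · obtain ⟨h1, h2⟩ := h
    interval_cases n <;> decide
  · have h' : n < 3 ∨ 39 < n := by omega
    rw [pvA_empty n h', pvB_empty n h']
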